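-- pv_equiv track=rewrite | github.com/fdorssers/Evolutionary-Scheduling | individual.py | get_period_to_room_to_exam_mapping
-- ===== SOURCE A (Python) =====
-- def get_period_to_room_to_exam_mapping(schedule):
--     period_to_room_to_exam_mapping = dict()
--     for exam_i, (room_i, period_i) in enumerate(schedule):
--         if period_i in period_to_room_to_exam_mapping:
--             if room_i in period_to_room_to_exam_mapping[period_i]:
--                 period_to_room_to_exam_mapping[period_i][room_i].append(exam_i)
--             else:
--                 period_to_room_to_exam_mapping[period_i][room_i] = [exam_i]
--         else:
--             period_to_room_to_exam_mapping[period_i] = dict()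
--             period_to_room_to_exam_mapping[period_i][room_i] = [exam_i]
--     return period_to_room_to_exam_mapping
-- ===== SOURCE B (Python) =====
-- def get_period_to_room_to_exam_mapping(schedule):
--     # Pass 1: flatten into a dict keyed by the (room, period) pair.
--     records = [((room_i, period_i), exam_i)
--                for exam_i, (room_i, period_i) in enumerate(schedule)]
--     flat = {}
--     for key, exam_i in records:
--         flat.setdefault(key, []).append(exam_i)
--     # Pass 2: assemble the nested mapping from the flat groups.
--     result = {}
--     for (room_i, period_i), exam_is in flat.items():
--         result.setdefault(period_i, {})[room_i] = exam_is
--     return result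
-- ===== Notes on version B (the rewrite author's own statement) =====
-- stated objective: alternative
-- what changed: Replaces A's single pass over a nested dict-of-dicts (three branch cases) by two flat passes: first group exam indices in a flat dict keyed by the (room, period) pair, then assemble the nested {period: {room: [...]}} mapping from those groups.
import Mathlib
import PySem

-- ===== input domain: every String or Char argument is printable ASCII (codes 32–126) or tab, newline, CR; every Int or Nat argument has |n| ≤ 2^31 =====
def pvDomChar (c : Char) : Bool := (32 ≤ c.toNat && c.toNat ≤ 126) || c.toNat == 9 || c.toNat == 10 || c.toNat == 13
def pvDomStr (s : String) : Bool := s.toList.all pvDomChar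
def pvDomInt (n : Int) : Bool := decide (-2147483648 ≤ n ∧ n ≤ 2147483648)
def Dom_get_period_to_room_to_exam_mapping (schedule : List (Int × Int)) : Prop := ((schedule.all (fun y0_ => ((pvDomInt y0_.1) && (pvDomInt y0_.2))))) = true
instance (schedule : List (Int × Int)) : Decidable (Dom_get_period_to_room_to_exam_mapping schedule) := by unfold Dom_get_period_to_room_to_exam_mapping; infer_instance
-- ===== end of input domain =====

-- B replaces A's single pass over a nested dict-of-dicts by two flat passes (group by the
-- (room, period) pair, then assemble the nested mapping); alternative decomposition, same O(n) cost.

-- ===== PORT A =====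
-- the loop body of A: schedule entry q = (exam_i, (room_i, period_i))
def pvStepA (d : PySem.Dict Int (PySem.Dict Int (List Int))) (q : Int × (Int × Int)) :
    PySem.Dict Int (PySem.Dict Int (List Int)) :=
  if d.contains q.2.2 then
    if (d.getD q.2.2 PySem.Dict.empty).contains q.2.1 then
      d.insert q.2.2 ((d.getD q.2.2 PySem.Dict.empty).insert q.2.1
        ((d.getD q.2.2 PySem.Dict.empty).getD q.2.1 [] ++ [q.1]))
    else
      d.insert q.2.2 ((d.getD q.2.2 PySem.Dict.empty).insert q.2.1 [q.1])
  else
    d.insert q.2.2 (PySem.Dict.empty.insert q.2.1 [q.1])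

def get_period_to_room_to_exam_mapping (schedule : List (Int × Int)) :
    List (Int × List (Int × List Int)) :=
  (((PySem.List.enumerate schedule).foldl pvStepA PySem.Dict.empty).items).map
    (fun pr => (pr.1, pr.2.items))

-- ===== PORT B =====
-- first loop of B: flat.setdefault(key, []).append(exam_i), record q = ((room_i, period_i), exam_i)
def pvFlatStep (d : PySem.Dict (Int × Int) (List Int)) (q : (Int × Int) × Int) :
    PySem.Dict (Int × Int) (List Int) :=
  d.modify q.1 [] (fun v => v ++ [q.2])

-- second loop of B: result.setdefault(period_i, {})[room_i] = exam_is
def pvAsmStep (d : PySem.Dict Int (PySem.Dict Int (List Int))) (q : (Int × Int) × List Int) :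
    PySem.Dict Int (PySem.Dict Int (List Int)) :=
  let d' := d.setdefault q.1.2 PySem.Dict.empty
  d'.insert q.1.2 ((d'.getD q.1.2 PySem.Dict.empty).insert q.1.1 q.2)

def get_period_to_room_to_exam_mapping_alt (schedule : List (Int × Int)) :
    List (Int × List (Int × List Int)) :=
  let records := (PySem.List.enumerate schedule).map (fun q => ((q.2.1, q.2.2), q.1))
  let flat := records.foldl pvFlatStep PySem.Dict.empty
  let result := flat.items.foldl pvAsmStep PySem.Dict.empty
  result.items.map (fun pr => (pr.1, pr.2.items))

-- ===== PRECONDITION & SPEC =====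
def Spec_get_period_to_room_to_exam_mapping (schedule : List (Int × Int)) (out : List (Int × List (Int × List Int))) : Prop := out = get_period_to_room_to_exam_mapping_alt schedule
instance (schedule : List (Int × Int)) (out : List (Int × List (Int × List Int))) : Decidable (Spec_get_period_to_room_to_exam_mapping schedule out) := by unfold Spec_get_period_to_room_to_exam_mapping; infer_instance

-- ===== CLAIM (what is proved, stated in full; the proofs are below) =====
def Claim_equal_get_period_to_room_to_exam_mapping : Prop := ∀ (schedule : List (Int × Int)), Dom_get_period_to_room_to_exam_mapping schedule → Spec_get_period_to_room_to_exam_mapping schedule (get_period_to_room_to_exam_mapping schedule)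

-- ===== LEMMAS AND PROOFS =====

-- the common canonical value both ports compute, over the enumerated record list E
def pvCanon (E : List (Int × (Int × Int))) : List (Int × List (Int × List Int)) :=
  (PySem.Set.ofList (E.map (fun q => q.2.2))).map (fun p =>
    (p, (PySem.Set.ofList ((E.filter (fun q => q.2.2 == p)).map (fun q => q.2.1))).map (fun r =>
      (r, ((E.filter (fun q => q.2.2 == p)).filter (fun q => q.2.1 == r)).map (fun q => q.1)))))

-- ---- generic Set.ofList facts (first-occurrence dedup) ----
theorem pv_ofList_filter {α : Type} [BEq α] [LawfulBEq α] (f : α → Bool) (l : List α) :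
    PySem.Set.ofList (l.filter f) = (PySem.Set.ofList l).filter f := by
  induction l using List.reverseRecOn with
  | nil => rfl
  | append_singleton l x ih =>
    rw [List.filter_append, PySem.Set.ofList_append_singleton]
    by_cases hf : f x = true
    · rw [show List.filter f [x] = [x] by simp [hf], PySem.Set.ofList_append_singleton, ih]
      by_cases hx : x ∈ (l : List α)
      · rw [PySem.Set.add_of_mem ((PySem.Set.mem_ofList l x).mpr hx),
          PySem.Set.add_of_mem
            (List.mem_filter.mpr ⟨(PySem.Set.mem_ofList l x).mpr hx, hf⟩)]
      · rw [PySem.Set.add_of_not_mem (fun h => hx ((PySem.Set.mem_ofList l x).mp h)),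
          PySem.Set.add_of_not_mem
            (fun h => hx ((PySem.Set.mem_ofList l x).mp (List.mem_filter.mp h).1)),
          List.filter_append]
        simp [hf]
    · rw [show List.filter f [x] = [] by simp [hf], List.append_nil, ih]
      by_cases hx : x ∈ (l : List α)
      · rw [PySem.Set.add_of_mem ((PySem.Set.mem_ofList l x).mpr hx)]
      · rw [PySem.Set.add_of_not_mem (fun h => hx ((PySem.Set.mem_ofList l x).mp h)),
          List.filter_append]
        simp [hf]

theorem pv_ofList_map_ofList {α β : Type} [BEq α] [LawfulBEq α] [BEq β] [LawfulBEq β]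
    (f : α → β) (l : List α) :
    PySem.Set.ofList ((PySem.Set.ofList l).map f) = PySem.Set.ofList (l.map f) := by
  induction l using List.reverseRecOn with
  | nil => rfl
  | append_singleton l x ih =>
    by_cases hx : x ∈ (l : List α)
    · have h1 : PySem.Set.ofList (l ++ [x]) = PySem.Set.ofList l := by
        rw [PySem.Set.ofList_append_singleton,
          PySem.Set.add_of_mem ((PySem.Set.mem_ofList l x).mpr hx)]
      rw [h1, ih, List.map_append, show List.map f [x] = [f x] from rfl,
        PySem.Set.ofList_append_singleton,
        PySem.Set.add_of_mem ((PySem.Set.mem_ofList _ _).mpr (List.mem_map_of_mem hx))]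
    · have h1 : PySem.Set.ofList (l ++ [x]) = PySem.Set.ofList l ++ [x] := by
        rw [PySem.Set.ofList_append_singleton,
          PySem.Set.add_of_not_mem (fun h => hx ((PySem.Set.mem_ofList l x).mp h))]
      rw [h1, List.map_append, show List.map f [x] = [f x] from rfl,
        PySem.Set.ofList_append_singleton, ih, List.map_append,
        show List.map f [x] = [f x] from rfl, PySem.Set.ofList_append_singleton]

theorem pv_ofList_map_pair (p : Int) (l : List Int) :
    PySem.Set.ofList (l.map (fun r => (r, p))) = (PySem.Set.ofList l).map (fun r => (r, p)) := by
  induction l using List.reverseRecOn with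
  | nil => rfl
  | append_singleton l x ih =>
    rw [List.map_append, show List.map (fun r => (r, p)) [x] = [(x, p)] from rfl,
      PySem.Set.ofList_append_singleton, ih]
    by_cases hx : x ∈ (l : List Int)
    · have h1 : PySem.Set.ofList (l ++ [x]) = PySem.Set.ofList l := by
        rw [PySem.Set.ofList_append_singleton,
          PySem.Set.add_of_mem ((PySem.Set.mem_ofList l x).mpr hx)]
      rw [h1, PySem.Set.add_of_mem (List.mem_map_of_mem ((PySem.Set.mem_ofList l x).mpr hx))]
    · have h1 : PySem.Set.ofList (l ++ [x]) = PySem.Set.ofList l ++ [x] := by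
        rw [PySem.Set.ofList_append_singleton,
          PySem.Set.add_of_not_mem (fun h => hx ((PySem.Set.mem_ofList l x).mp h))]
      have h2 : (x, p) ∉ List.map (fun r => (r, p)) (PySem.Set.ofList l) := by
        intro h
        obtain ⟨y, hy, hyx⟩ := List.mem_map.mp h
        have : y = x := congrArg Prod.fst hyx
        exact hx ((PySem.Set.mem_ofList l x).mp (this ▸ hy))
      rw [h1, PySem.Set.add_of_not_mem h2, List.map_append]
      rfl

-- ---- A-side characterisation ----
def pvAD (E : List (Int × (Int × Int))) : PySem.Dict Int (PySem.Dict Int (List Int)) :=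
  E.foldl pvStepA PySem.Dict.empty

def pvInner (p : Int) (E : List (Int × (Int × Int))) : PySem.Dict Int (List Int) :=
  (E.filter (fun q => q.2.2 == p)).foldl
    (fun d q => d.modify q.2.1 [] (fun v => v ++ [q.1])) PySem.Dict.empty

theorem pv_stepA_eq (d : PySem.Dict Int (PySem.Dict Int (List Int))) (q : Int × (Int × Int)) :
    pvStepA d q
      = d.insert q.2.2 ((d.getD q.2.2 PySem.Dict.empty).modify q.2.1 [] (fun v => v ++ [q.1])) := by
  unfold pvStepA PySem.Dict.modify
  by_cases hc : d.contains q.2.2 = true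
  · by_cases hr : (d.getD q.2.2 PySem.Dict.empty).contains q.2.1 = true
    · simp [hc, hr]
    · simp [hc, hr, PySem.Dict.getD_of_not_contains _ _ (by simpa using hr)]
  · simp [hc, PySem.Dict.getD_of_not_contains _ _ (by simpa using hc),
      PySem.Dict.getD_of_not_contains _ _ (PySem.Dict.contains_empty _)]

theorem pv_AD_keys (E : List (Int × (Int × Int))) :
    (pvAD E).keys = PySem.Set.ofList (E.map (fun q => q.2.2)) := by
  unfold pvAD
  rw [show pvStepA = (fun d (q : Int × (Int × Int)) =>
      d.insert q.2.2 ((d.getD q.2.2 PySem.Dict.empty).modify q.2.1 [] (fun v => v ++ [q.1])))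
    from funext fun d => funext fun q => pv_stepA_eq d q]
  rw [PySem.Dict.keys_foldl_insert_key E (fun q => q.2.2)
    (fun d q => (d.getD q.2.2 PySem.Dict.empty).modify q.2.1 [] (fun v => v ++ [q.1]))
    PySem.Dict.empty]
  simp [PySem.Dict.keys_empty, PySem.Set.update_nil_left]

theorem pv_AD_getD (E : List (Int × (Int × Int))) (p : Int) :
    (pvAD E).getD p PySem.Dict.empty = pvInner p E := by
  induction E using List.reverseRecOn with
  | nil => rfl
  | append_singleton E q ih =>
    unfold pvAD pvInner at *
    rw [List.foldl_append, List.filter_append]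
    by_cases hp : p = q.2.2
    · subst hp
      rw [List.foldl_cons, List.foldl_nil, pv_stepA_eq,
        PySem.Dict.getD_insert, if_pos rfl,
        show List.filter (fun q' => q'.2.2 == q.2.2) [q] = [q] by simp,
        List.foldl_append, List.foldl_cons, List.foldl_nil, ih]
    · rw [List.foldl_cons, List.foldl_nil, pv_stepA_eq,
        PySem.Dict.getD_insert, if_neg hp,
        show List.filter (fun q' => q'.2.2 == p) [q] = [] by simp [Ne.symm hp],
        List.append_nil, ih]

theorem pv_inner_keys (p : Int) (E : List (Int × (Int × Int))) :
    (pvInner p E).keys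
      = PySem.Set.ofList ((E.filter (fun q => q.2.2 == p)).map (fun q => q.2.1)) := by
  unfold pvInner
  rw [PySem.Dict.keys_foldl_modify_key (E.filter (fun q => q.2.2 == p)) (fun q => q.2.1) []
    (fun _ q => fun v => v ++ [q.1]) PySem.Dict.empty]
  simp [PySem.Dict.keys_empty, PySem.Set.update_nil_left]

theorem pv_inner_getD (p : Int) (E : List (Int × (Int × Int))) (r : Int) :
    (pvInner p E).getD r []
      = ((E.filter (fun q => q.2.2 == p)).filter (fun q => q.2.1 == r)).map (fun q => q.1) := by
  unfold pvInner
  have h := PySem.Dict.getD_foldl_modify_append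
    ((E.filter (fun q => q.2.2 == p)).map (fun q => (q.2.1, q.1))) PySem.Dict.empty r
  simp only [List.foldl_map] at h
  rw [h]
  simp [List.filter_map, Function.comp_def, PySem.Dict.getD_empty]

theorem pv_A_canon (schedule : List (Int × Int)) :
    get_period_to_room_to_exam_mapping schedule = pvCanon (PySem.List.enumerate schedule) := by
  unfold get_period_to_room_to_exam_mapping pvCanon
  have hnd : (pvAD (PySem.List.enumerate schedule)).keys.Nodup := by
    rw [pv_AD_keys]; exact PySem.Set.nodup_ofList _
  rw [show (PySem.List.enumerate schedule).foldl pvStepA PySem.Dict.empty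
      = pvAD (PySem.List.enumerate schedule) from rfl]
  rw [PySem.Dict.items_eq_map_keys _ hnd PySem.Dict.empty, pv_AD_keys, List.map_map]
  refine List.map_congr_left ?_
  intro p _
  simp only [Function.comp_apply, pv_AD_getD]
  have hnd2 : (pvInner p (PySem.List.enumerate schedule)).keys.Nodup := by
    rw [pv_inner_keys]; exact PySem.Set.nodup_ofList _
  rw [PySem.Dict.items_eq_map_keys _ hnd2 [], pv_inner_keys, List.map_congr_left
    (fun r _ => by rw [pv_inner_getD])]

-- ---- B-side characterisation ----
def pvBF (E : List (Int × (Int × Int))) : PySem.Dict (Int × Int) (List Int) :=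
  (E.map (fun q => ((q.2.1, q.2.2), q.1))).foldl pvFlatStep PySem.Dict.empty

theorem pv_BF_getD (E : List (Int × (Int × Int))) (k : Int × Int) :
    (pvBF E).getD k [] = (E.filter (fun q => (q.2.1, q.2.2) == k)).map (fun q => q.1) := by
  unfold pvBF pvFlatStep
  rw [PySem.Dict.getD_foldl_modify_append]
  simp [List.filter_map, Function.comp_def, PySem.Dict.getD_empty]

theorem pv_BF_keys (E : List (Int × (Int × Int))) :
    (pvBF E).keys = PySem.Set.ofList (E.map (fun q => (q.2.1, q.2.2))) := by
  unfold pvBF pvFlatStep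
  rw [PySem.Dict.keys_foldl_modify_key (E.map (fun q => ((q.2.1, q.2.2), q.1)))
    (fun q => q.1) [] (fun _ q => fun v => v ++ [q.2]) PySem.Dict.empty]
  simp [PySem.Dict.keys_empty, PySem.Set.update_nil_left, List.map_map, Function.comp_def]

theorem pv_asmStep_eq (d : PySem.Dict Int (PySem.Dict Int (List Int))) (q : (Int × Int) × List Int) :
    pvAsmStep d q = d.insert q.1.2 ((d.getD q.1.2 PySem.Dict.empty).insert q.1.1 q.2) := by
  unfold pvAsmStep
  by_cases hc : d.contains q.1.2 = true
  · simp [PySem.Dict.setdefault_of_contains _ _ hc]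
  · rw [PySem.Dict.setdefault_of_not_contains _ _ (by simpa using hc)]
    simp [PySem.Dict.getD_insert_self, PySem.Dict.insert_insert_self,
      PySem.Dict.getD_of_not_contains _ _ (by simpa using hc)]

theorem pv_asm_getD (L : List ((Int × Int) × List Int)) (p : Int) :
    (L.foldl pvAsmStep PySem.Dict.empty).getD p PySem.Dict.empty
      = (L.filter (fun q => q.1.2 == p)).foldl
          (fun d q => d.insert q.1.1 q.2) PySem.Dict.empty := by
  induction L using List.reverseRecOn with
  | nil => rfl
  | append_singleton L q ih =>
    rw [List.foldl_append, List.filter_append]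
    by_cases hp : p = q.1.2
    · subst hp
      rw [List.foldl_cons, List.foldl_nil, pv_asmStep_eq,
        PySem.Dict.getD_insert, if_pos rfl,
        show List.filter (fun q' => q'.1.2 == q.1.2) [q] = [q] by simp,
        List.foldl_append, List.foldl_cons, List.foldl_nil, ih]
    · have : (q.1.2 == p) = false := by simp [Ne.symm hp]
      simp only [List.foldl_cons, List.foldl_nil, pv_asmStep_eq, List.filter_cons, this,
        List.filter_nil, List.append_nil, Bool.false_eq_true, if_neg, not_false_iff]
      rw [PySem.Dict.getD_insert, if_neg hp, ih]

theorem pv_asm_keys (L : List ((Int × Int) × List Int)) :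
    (L.foldl pvAsmStep PySem.Dict.empty).keys = PySem.Set.ofList (L.map (fun q => q.1.2)) := by
  rw [show pvAsmStep = (fun d (q : (Int × Int) × List Int) =>
      d.insert q.1.2 ((d.getD q.1.2 PySem.Dict.empty).insert q.1.1 q.2))
    from funext fun d => funext fun q => pv_asmStep_eq d q]
  rw [PySem.Dict.keys_foldl_insert_key L (fun q => q.1.2)
    (fun d q => (d.getD q.1.2 PySem.Dict.empty).insert q.1.1 q.2) PySem.Dict.empty]
  simp [PySem.Dict.keys_empty, PySem.Set.update_nil_left]

theorem pv_B_canon (schedule : List (Int × Int)) :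
    get_period_to_room_to_exam_mapping_alt schedule = pvCanon (PySem.List.enumerate schedule) := by
  unfold get_period_to_room_to_exam_mapping_alt pvCanon
  set E := PySem.List.enumerate schedule with hE
  show ((((E.map (fun q => ((q.2.1, q.2.2), q.1))).foldl pvFlatStep
      PySem.Dict.empty).items.foldl pvAsmStep PySem.Dict.empty).items).map
      (fun pr => (pr.1, pr.2.items)) = _
  have hkeys := pv_BF_keys E
  have hknd : (pvBF E).keys.Nodup := by rw [hkeys]; exact PySem.Set.nodup_ofList _
  have hitems := PySem.Dict.items_eq_map_keys (pvBF E) hknd []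
  rw [show (E.map (fun q => ((q.2.1, q.2.2), q.1))).foldl pvFlatStep PySem.Dict.empty
      = pvBF E from rfl]
  -- outer dict: its key list is the dedup of the period list
  have hRnd : ((pvBF E).items.foldl pvAsmStep PySem.Dict.empty).keys.Nodup := by
    rw [pv_asm_keys]; exact PySem.Set.nodup_ofList _
  rw [PySem.Dict.items_eq_map_keys _ hRnd PySem.Dict.empty, pv_asm_keys, List.map_map]
  have houter : PySem.Set.ofList ((pvBF E).items.map (fun q => q.1.2))
      = PySem.Set.ofList (E.map (fun q => q.2.2)) := by
    rw [hitems, hkeys, List.map_map]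
    rw [show ((fun q : (Int × Int) × List Int => q.1.2) ∘ fun k => (k, (pvBF E).getD k []))
        = (fun k : Int × Int => k.2) from rfl]
    rw [pv_ofList_map_ofList, List.map_map]; rfl
  rw [houter]
  refine List.map_congr_left ?_
  intro p _
  simp only [Function.comp_apply, pv_asm_getD]
  set R := (PySem.Set.ofList ((E.filter (fun q => q.2.2 == p)).map (fun q => q.2.1)) : List Int)
    with hR
  have hRnodup : R.Nodup := PySem.Set.nodup_ofList _
  -- the filtered item list, rewritten through the (deduplicated) key list
  have hfilt : (pvBF E).items.filter (fun q => q.1.2 == p)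
      = (R.map (fun r => (r, p))).map (fun k => (k, (pvBF E).getD k [])) := by
    rw [hitems, hkeys, List.filter_map]
    rw [show ((fun q : (Int × Int) × List Int => q.1.2 == p) ∘ fun k => (k, (pvBF E).getD k []))
        = (fun k : Int × Int => k.2 == p) from rfl]
    rw [← pv_ofList_filter, List.filter_map,
      show E.filter ((fun k : Int × Int => k.2 == p) ∘ fun q : Int × (Int × Int) => (q.2.1, q.2.2))
        = E.filter (fun q => q.2.2 == p) from List.filter_congr (fun a _ => rfl)]
    have : (E.filter (fun q => q.2.2 == p)).map (fun q => (q.2.1, q.2.2))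
        = ((E.filter (fun q => q.2.2 == p)).map (fun q => q.2.1)).map (fun r => (r, p)) := by
      rw [List.map_map]
      refine List.map_congr_left ?_
      intro q hq
      have : q.2.2 = p := by simpa using (List.mem_filter.mp hq).2
      simp [Function.comp_apply, this]
    rw [this, hR, pv_ofList_map_pair]
  rw [hfilt]
  -- inner dict: built over fresh distinct keys, so its items are the grouped records in order
  rw [PySem.Dict.items_foldl_insert_fresh
      ((R.map (fun r => (r, p))).map (fun k => (k, (pvBF E).getD k [])))
      (fun q => q.1.1) (fun q => q.2) PySem.Dict.empty
      (fun a _ => PySem.Dict.contains_empty _)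
      (by simpa [List.map_map, Function.comp_def] using hRnodup)]
  rw [show (PySem.Dict.empty : PySem.Dict Int (List Int)).items = [] from rfl, List.nil_append,
    List.map_map, List.map_map]
  congr 1
  refine List.map_congr_left ?_
  intro r _
  simp only [Function.comp_apply]
  rw [pv_BF_getD]
  congr 1
  rw [List.filter_filter]
  refine congrArg (List.map (fun q : Int × (Int × Int) => q.1)) (List.filter_congr ?_)
  intro q _
  refine Bool.eq_iff_iff.mpr ?_
  simp [Prod.ext_iff]

-- ===== VERDICT (by name: the statement is the Claim_ definition above) =====
theorem get_period_to_room_to_exam_mapping_spec : Claim_equal_get_period_to_room_to_exam_mapping := by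
  intro schedule _
  unfold Spec_get_period_to_room_to_exam_mapping
  rw [pv_A_canon, pv_B_canon]
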